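-- pv_equiv track=rewrite | github.com/Patrolin/scripts | scrape_todo.py | parse_todos
-- ===== SOURCE A (Python) =====
-- def parse_todos(text: str) -> list[str]:
--     acc_todos = []
--     for line in text.splitlines():
--         if line.startswith("GIVEN"):
--             acc_todos.append("")
--         if acc_todos and line.strip():
--             acc_todos[-1] = acc_todos[-1] + f"{line}\n"
--     if acc_todos and (acc_todos[-1] == ""): acc_todos.pop()
--     return acc_todos
-- ===== SOURCE B (Python) =====
-- def parse_todos(text: str) -> list[str]:
--     # Reverse single pass: group lines bottom-up into the block of their
--     # preceding GIVEN line, render each block at once, no in-place growing.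
--     blocks = []
--     cur = []
--     for line in reversed(text.splitlines()):
--         cur.append(line)
--         if line.startswith("GIVEN"):
--             blocks.append("".join(f"{l}\n" for l in reversed(cur) if l.strip()))
--             cur = []
--     blocks.reverse()
--     return blocks
-- ===== Notes on version B (the rewrite author's own statement) =====
-- stated objective: alternative
-- what changed: A builds blocks forward, appending an empty block at each GIVEN and string-concatenating every kept line onto the last block in place, then pops a trailing empty block; B makes one reverse pass that groups each line with its preceding GIVEN line and renders each whole block at once with a single join, needing no in-place growth and no final pop.
import Mathlib
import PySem

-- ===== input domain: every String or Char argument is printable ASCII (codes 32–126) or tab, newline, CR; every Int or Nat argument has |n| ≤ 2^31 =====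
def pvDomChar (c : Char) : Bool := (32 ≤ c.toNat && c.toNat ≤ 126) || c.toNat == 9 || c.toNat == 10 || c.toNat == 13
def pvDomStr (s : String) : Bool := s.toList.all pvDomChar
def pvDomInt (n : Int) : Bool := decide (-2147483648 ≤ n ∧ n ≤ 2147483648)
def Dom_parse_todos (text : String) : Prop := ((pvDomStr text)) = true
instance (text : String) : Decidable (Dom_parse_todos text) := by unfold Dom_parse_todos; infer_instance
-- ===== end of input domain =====

-- B replaces A's forward pass (which grows the last block in place and pops a
-- possible empty trailing block) by a single reverse pass that groups each
-- line with its preceding GIVEN line and renders every block at once.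

-- ===== PORT A =====
def pvStepA (acc : List String) (line : String) : List String :=
  let acc1 := if PySem.Str.startswith line "GIVEN" then acc ++ [""] else acc
  if acc1 ≠ [] ∧ PySem.Str.strip line ≠ "" then
    acc1.dropLast ++ [acc1.getLast! ++ line ++ "\n"]
  else acc1

def parse_todos (text : String) : List String :=
  let acc := (PySem.Str.splitlines text).foldl pvStepA []
  if acc ≠ [] ∧ acc.getLast! = "" then acc.dropLast else acc

-- ===== PORT B =====
-- "".join(f"{l}\n" for l in cur if l.strip())
def pvRender (cur : List String) : String :=
  PySem.Str.join "" ((cur.filter (fun l => decide (PySem.Str.strip l ≠ ""))).map (fun l => l ++ "\n"))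

-- one step of B's 'for line in reversed(lines)' loop (state = (blocks, cur))
def pvStepB (line : String) (s : List String × List String) : List String × List String :=
  let cur := s.2 ++ [line]
  if PySem.Str.startswith line "GIVEN" then (s.1 ++ [pvRender cur.reverse], [])
  else (s.1, cur)

def parse_todos_alt (text : String) : List String :=
  ((PySem.Str.splitlines text).foldr pvStepB ([], [])).1.reverse

-- ===== PRECONDITION & SPEC =====
def Spec_parse_todos (text : String) (out : List String) : Prop := out = parse_todos_alt text
instance (text : String) (out : List String) : Decidable (Spec_parse_todos text out) := by unfold Spec_parse_todos; infer_instance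

-- ===== CLAIM (what is proved, stated in full; the proofs are below) =====
def Claim_equal_parse_todos : Prop := ∀ (text : String), Dom_parse_todos text → Spec_parse_todos text (parse_todos text)

-- ===== LEMMAS AND PROOFS =====

-- blocks of lines: each starts at a GIVEN line and runs to the next one
def pvSegs : List String → List (List String)
  | [] => []
  | l :: ls =>
    if PySem.Str.startswith l "GIVEN" = true then
      (l :: ls.takeWhile (fun x => !PySem.Str.startswith x "GIVEN")) ::
        pvSegs (ls.dropWhile (fun x => !PySem.Str.startswith x "GIVEN"))
    else pvSegs ls
termination_by ls => ls.length
decreasing_by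
  · exact Nat.lt_succ_of_le (List.length_dropWhile_le _ _)
  · exact Nat.lt_succ_self _

lemma pvSegs_cons (l : String) (ls : List String) :
    pvSegs (l :: ls) =
      if PySem.Str.startswith l "GIVEN" = true then
        (l :: ls.takeWhile (fun x => !PySem.Str.startswith x "GIVEN")) ::
          pvSegs (ls.dropWhile (fun x => !PySem.Str.startswith x "GIVEN"))
      else pvSegs ls := by
  rw [pvSegs.eq_def]

lemma pvGetLast!_concat {α : Type} [Inhabited α] (xs : List α) (y : α) :
    (xs ++ [y]).getLast! = y := by
  cases xs with
  | nil => rfl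
  | cons a as => simp [List.getLast!]

lemma pvStrip_ne (l : String) (h : PySem.Str.startswith l "GIVEN" = true) :
    PySem.Str.strip l ≠ "" := by
  intro e
  have e' : (PySem.Str.strip l).toList = [] := by rw [e]; rfl
  rw [PySem.Str.toList_strip] at e'
  have hpre : "GIVEN".toList <+: l.toList := by
    rw [PySem.Str.startswith_eq] at h
    exact (PySem.Chars.startswith_iff _ _).mp h
  obtain ⟨t, ht⟩ := hpre
  have hG : 'G' ∈ l.toList := by
    rw [← ht]
    simp [show "GIVEN".toList = ['G','I','V','E','N'] by decide]
  -- strip = rstrip (lstrip); empty result forces every char to be whitespace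
  unfold PySem.Chars.strip PySem.Chars.rstrip PySem.Chars.lstrip at e'
  have h2 : List.dropWhile PySem.Chars.isspace
      ((List.dropWhile PySem.Chars.isspace l.toList).reverse) = [] := by
    simpa using congrArg List.reverse e'
  have hall := List.dropWhile_eq_nil_iff.mp h2
  have hG' : 'G' ∈ List.dropWhile PySem.Chars.isspace l.toList := by
    have h' : 'G' ∈ List.takeWhile PySem.Chars.isspace l.toList ++
        List.dropWhile PySem.Chars.isspace l.toList := by
      rw [List.takeWhile_append_dropWhile]; exact hG
    rcases List.mem_append.mp h' with htk | hdw
    · exact absurd (List.mem_takeWhile_imp htk) (by decide)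
    · exact hdw
  exact absurd (hall 'G' (List.mem_reverse.mpr hG')) (by decide)

lemma pvJoin_empty_cons (x : String) (xs : List String) :
    PySem.Str.join "" (x :: xs) = x ++ PySem.Str.join "" xs := by
  rw [← String.toList_inj]
  rw [String.toList_append, PySem.Str.toList_join, PySem.Str.toList_join]
  cases xs with
  | nil => simp [PySem.Chars.join_singleton, PySem.Chars.join_nil]
  | cons y ys =>
      simp only [List.map_cons]
      rw [PySem.Chars.join_cons_cons]
      simp

lemma pvRender_nil : pvRender [] = "" := by
  rw [pvRender, ← String.toList_inj]
  simp [PySem.Str.toList_join, PySem.Chars.join_nil]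

lemma pvRender_cons_keep (l : String) (t : List String) (h : PySem.Str.strip l ≠ "") :
    pvRender (l :: t) = (l ++ "\n") ++ pvRender t := by
  rw [pvRender, pvRender, List.filter_cons, if_pos (by simpa using h), List.map_cons,
    pvJoin_empty_cons]

lemma pvRender_cons_drop (l : String) (t : List String) (h : PySem.Str.strip l = "") :
    pvRender (l :: t) = pvRender t := by
  rw [pvRender, pvRender, List.filter_cons, if_neg (by simp [h])]

lemma pvFoldlA_append (ls : List String) : ∀ (acc : List String) (b : String),
    ls.foldl pvStepA (acc ++ [b]) =
      acc ++ (b ++ pvRender (ls.takeWhile (fun x => !PySem.Str.startswith x "GIVEN"))) ::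
        (pvSegs (ls.dropWhile (fun x => !PySem.Str.startswith x "GIVEN"))).map pvRender := by
  induction ls with
  | nil => intro acc b; simp [pvSegs, pvRender_nil]
  | cons l ls ih =>
    intro acc b
    rw [List.foldl_cons]
    by_cases hG : PySem.Str.startswith l "GIVEN" = true
    · have hGc : PySem.Chars.startswith l.toList ['G','I','V','E','N'] = true := by
        simpa using hG
      have hs := pvStrip_ne l hG
      have hstep : pvStepA (acc ++ [b]) l = (acc ++ [b]) ++ ["" ++ l ++ "\n"] := by
        simp only [pvStepA, hG, if_true]
        rw [show acc ++ [b] ++ [""] = (acc ++ [b]) ++ [""] from by simp]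
        rw [if_pos ⟨by simp, hs⟩, List.dropLast_concat, pvGetLast!_concat]
      rw [hstep, ih (acc ++ [b]) _]
      rw [List.takeWhile_cons, if_neg (by simp [hGc]), List.dropWhile_cons,
        if_neg (by simp [hGc]), pvSegs_cons, if_pos hG]
      rw [pvRender_nil, List.map_cons, pvRender_cons_keep l _ hs]
      simp [String.append_assoc]
    · have hGc : PySem.Chars.startswith l.toList ['G','I','V','E','N'] = false := by
        simpa using hG
      rw [List.takeWhile_cons, if_pos (by simp [hGc]), List.dropWhile_cons,
        if_pos (by simp [hGc])]
      by_cases hs : PySem.Str.strip l = ""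
      · have hstep : pvStepA (acc ++ [b]) l = acc ++ [b] := by
          simp only [pvStepA]
          rw [if_neg hG, if_neg (show ¬(acc ++ [b] ≠ [] ∧ PySem.Str.strip l ≠ "") from
            fun hc => hc.2 hs)]
        rw [hstep, ih acc b, pvRender_cons_drop l _ hs]
      · have hstep : pvStepA (acc ++ [b]) l = acc ++ [b ++ l ++ "\n"] := by
          simp only [pvStepA]
          rw [if_neg hG, if_pos (show acc ++ [b] ≠ [] ∧ PySem.Str.strip l ≠ "" from
            ⟨by simp, hs⟩), List.dropLast_concat, pvGetLast!_concat]
        rw [hstep, ih acc _, pvRender_cons_keep l _ hs]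
        simp [String.append_assoc]

lemma pvFoldlA_nil (ls : List String) :
    ls.foldl pvStepA [] = (pvSegs ls).map pvRender := by
  induction ls with
  | nil => simp [pvSegs]
  | cons l ls ih =>
    rw [List.foldl_cons]
    by_cases hG : PySem.Str.startswith l "GIVEN" = true
    · have hGc : PySem.Chars.startswith l.toList ['G','I','V','E','N'] = true := by
        simpa using hG
      have hs := pvStrip_ne l hG
      have hstep : pvStepA [] l = ([] : List String) ++ ["" ++ l ++ "\n"] := by
        simp only [pvStepA, hG, if_true]
        rw [show (if ([] : List String) ++ [""] ≠ [] ∧ PySem.Str.strip l ≠ "" then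
            (([] : List String) ++ [""]).dropLast ++ [(([] : List String) ++ [""]).getLast! ++ l ++ "\n"]
          else ([] : List String) ++ [""]) =
            (([] : List String) ++ [""]).dropLast ++ [(([] : List String) ++ [""]).getLast! ++ l ++ "\n"]
          from if_pos ⟨by simp, hs⟩]
        rw [List.dropLast_concat, pvGetLast!_concat]
      rw [hstep, pvFoldlA_append ls [] _, pvSegs_cons, if_pos hG]
      rw [List.map_cons, pvRender_cons_keep l _ hs]
      simp [String.append_assoc]
    · have hGc : PySem.Chars.startswith l.toList ['G','I','V','E','N'] = false := by
        simpa using hG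
      have hstep : pvStepA [] l = [] := by
        simp only [pvStepA]
        rw [if_neg hG, if_neg (show ¬(([] : List String) ≠ [] ∧ PySem.Str.strip l ≠ "") from
          fun hc => hc.1 rfl)]
      rw [hstep, ih, pvSegs_cons, if_neg hG]

lemma pvSegs_dropWhile (ls : List String) :
    pvSegs (ls.dropWhile (fun x => !PySem.Str.startswith x "GIVEN")) = pvSegs ls := by
  induction ls with
  | nil => rfl
  | cons l ls ih =>
    by_cases hG : PySem.Str.startswith l "GIVEN" = true
    · have hGc : PySem.Chars.startswith l.toList ['G','I','V','E','N'] = true := by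
        simpa using hG
      rw [List.dropWhile_cons, if_neg (by simp [hGc])]
    · have hGc : PySem.Chars.startswith l.toList ['G','I','V','E','N'] = false := by
        simpa using hG
      rw [List.dropWhile_cons, if_pos (by simp [hGc]), ih, pvSegs_cons, if_neg hG]

lemma pvFoldrB (ls : List String) :
    ls.foldr pvStepB ([], []) =
      (((pvSegs ls).map pvRender).reverse,
       (ls.takeWhile (fun x => !PySem.Str.startswith x "GIVEN")).reverse) := by
  induction ls with
  | nil => simp [pvSegs]
  | cons l ls ih =>
    rw [List.foldr_cons, ih]
    by_cases hG : PySem.Str.startswith l "GIVEN" = true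
    · have hGc : PySem.Chars.startswith l.toList ['G','I','V','E','N'] = true := by
        simpa using hG
      simp only [pvStepB, hG, if_true]
      rw [pvSegs_cons, if_pos hG, List.takeWhile_cons, if_neg (by simp [hGc])]
      rw [← pvSegs_dropWhile ls]
      simp
    · have hGc : PySem.Chars.startswith l.toList ['G','I','V','E','N'] = false := by
        simpa using hG
      simp only [pvStepB]
      rw [if_neg hG, pvSegs_cons, if_neg hG, List.takeWhile_cons,
        if_pos (by simp [hGc])]
      simp

lemma pvAlt_eq (text : String) :
    parse_todos_alt text = (pvSegs (PySem.Str.splitlines text)).map pvRender := by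
  rw [parse_todos_alt, pvFoldrB]
  simp

lemma pvSegs_shape (ls : List String) :
    ∀ s ∈ pvSegs ls, ∃ g t, s = g :: t ∧ PySem.Str.startswith g "GIVEN" = true := by
  induction ls using pvSegs.induct with
  | case1 => intro s hs; simp [pvSegs] at hs
  | case2 l ls hG ih =>
    intro s hs
    rw [pvSegs_cons, if_pos hG] at hs
    rcases List.mem_cons.mp hs with h | h
    · exact ⟨l, _, h, hG⟩
    · exact ih s h
  | case3 l ls hG ih =>
    intro s hs
    rw [pvSegs_cons, if_neg hG] at hs
    exact ih s hs

lemma pvRender_ne_empty (g : String) (t : List String)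
    (hG : PySem.Str.startswith g "GIVEN" = true) : pvRender (g :: t) ≠ "" := by
  rw [pvRender_cons_keep g t (pvStrip_ne g hG)]
  intro e
  have e' : ((g ++ "\n") ++ pvRender t).toList = [] := by rw [e]; rfl
  rw [String.toList_append, String.toList_append] at e'
  rcases List.append_eq_nil_iff.mp e' with ⟨e1, _⟩
  rcases List.append_eq_nil_iff.mp e1 with ⟨_, e2⟩
  simp at e2

-- ===== VERDICT (by name: the statement is the Claim_ definition above) =====
theorem parse_todos_spec : Claim_equal_parse_todos := by
  intro text _
  unfold Spec_parse_todos
  rw [pvAlt_eq, parse_todos, pvFoldlA_nil]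
  rcases List.eq_nil_or_concat (pvSegs (PySem.Str.splitlines text)) with hnil | ⟨M, s, hM⟩
  · rw [hnil]; simp
  · rw [List.concat_eq_append] at hM
    have hsmem : s ∈ pvSegs (PySem.Str.splitlines text) := by rw [hM]; simp
    obtain ⟨g, t, rfl, hG⟩ := pvSegs_shape _ s hsmem
    rw [hM, List.map_append, show List.map pvRender [g :: t] = [pvRender (g :: t)] from rfl]
    rw [if_neg]
    rintro ⟨-, hlast⟩
    rw [pvGetLast!_concat] at hlast
    exact pvRender_ne_empty g t hG hlast
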